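-- pv_equiv track=rewrite | github.com/lorelang/lore | src/lore/parser.py | _split_sections_seq
-- ===== SOURCE A (Python) =====
-- def _split_sections_seq(body: str) -> list[tuple[str, str]]:
--     """Split body into [(section_name, content), ...] preserving order and duplicates."""
--     sections: list[tuple[str, str]] = []
--     current_section = "__preamble__"
--     lines: list[str] = []
--
--     for line in body.split("\n"):
--         if line.startswith("## "):
--             sections.append((current_section, "\n".join(lines).strip()))
--             current_section = line[3:].strip()
--             lines = []
--         else:
--             lines.append(line)
--
--     sections.append((current_section, "\n".join(lines).strip()))
--     return sections
-- ===== SOURCE B (Python) =====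
-- def _split_sections_seq(body: str) -> list[tuple[str, str]]:
--     """Split body into [(section_name, content), ...] preserving order and duplicates.
--
--     Staged index-based passes: first locate all header line indices, then cut
--     the line list between consecutive header positions, instead of A's stateful
--     accumulate-and-flush scan.
--     """
--     lines = body.split("\n")
--     heads = [i for i, l in enumerate(lines) if l.startswith("## ")]
--     first = heads[0] if heads else len(lines)
--     out = [("__preamble__", "\n".join(lines[:first]).strip())]
--     for i, nxt in zip(heads, heads[1:] + [len(lines)]):
--         out.append((lines[i][3:].strip(), "\n".join(lines[i + 1:nxt]).strip()))
--     return out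
-- ===== Notes on version B (the rewrite author's own statement) =====
-- stated objective: alternative
-- what changed: B replaces A's stateful accumulate-and-flush scan with staged index-based passes: it first collects all header line indices with enumerate, then cuts the line list between consecutive header positions by slicing.
import Mathlib
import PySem

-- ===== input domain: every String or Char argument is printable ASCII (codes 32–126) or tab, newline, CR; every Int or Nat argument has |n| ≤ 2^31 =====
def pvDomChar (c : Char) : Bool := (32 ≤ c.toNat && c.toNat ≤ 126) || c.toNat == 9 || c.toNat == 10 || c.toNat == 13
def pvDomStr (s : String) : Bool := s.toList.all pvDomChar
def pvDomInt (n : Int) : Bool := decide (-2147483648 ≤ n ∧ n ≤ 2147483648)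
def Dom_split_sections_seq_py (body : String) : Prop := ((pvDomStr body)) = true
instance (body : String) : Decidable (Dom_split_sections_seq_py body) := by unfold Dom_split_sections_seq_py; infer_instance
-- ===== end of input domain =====

-- B replaces A's stateful accumulate-and-flush scan with staged index-based passes:
-- locate all header line indices first, then cut the line list between consecutive
-- header positions ("alternative"; same linear cost).

-- ===== PORT A =====
-- shared primitive wrappers, identical subexpressions of both Python sources:
-- line.startswith("## "), line[3:].strip(), "\n".join(ls).strip()
-- body.split("\n"): separator is the nonempty literal "\n", so PySem.Str.split? is
-- always `some`; the `.getD []` branch is unreachable (exact port of both Pythons' split).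
def pvSplitLines (body : String) : List String := (PySem.Str.split? body "\n").getD []

def pvIsH (l : String) : Bool := PySem.Str.startswith l "## "
def pvNm (l : String) : String := PySem.Str.strip (PySem.Str.slice l (some 3) none)
def pvCt (ls : List String) : String := PySem.Str.strip (PySem.Str.join "\n" ls)

def pvStepA (st : List (String × String) × String × List String) (line : String) :
    List (String × String) × String × List String :=
  if pvIsH line then (st.1 ++ [(st.2.1, pvCt st.2.2)], pvNm line, ([] : List String))
  else (st.1, st.2.1, st.2.2 ++ [line])

def split_sections_seq_py (body : String) : List (String × String) :=
  let st := (pvSplitLines body).foldl pvStepA ([], "__preamble__", [])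
  st.1 ++ [(st.2.1, pvCt st.2.2)]

-- ===== PORT B =====
-- enumerate(lines) is ported with List.zipIdx (indices are the nonnegative line
-- positions, so Nat indices are exact); lines[a:b] with 0 ≤ a ≤ b, b ≤ len is
-- exactly (lines.drop a).take (b - a); lines[i] at a valid index i is getD i "".
def split_sections_seq_py_alt (body : String) : List (String × String) :=
  let lines := pvSplitLines body
  let heads := lines.zipIdx.filterMap (fun p => if pvIsH p.1 then some p.2 else none)
  let first := heads.headD lines.length
  ("__preamble__", pvCt (lines.take first)) ::
    (heads.zip (heads.drop 1 ++ [lines.length])).map (fun p =>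
      (pvNm ((lines.drop p.1).headD ""),
       pvCt ((lines.drop (p.1 + 1)).take (p.2 - (p.1 + 1)))))

-- ===== PRECONDITION & SPEC =====
def Spec_split_sections_seq_py (body : String) (out : List (String × String)) : Prop := out = split_sections_seq_py_alt body
instance (body : String) (out : List (String × String)) : Decidable (Spec_split_sections_seq_py body out) := by unfold Spec_split_sections_seq_py; infer_instance

-- ===== CLAIM (what is proved, stated in full; the proofs are below) =====
def Claim_equal_split_sections_seq_py : Prop := ∀ (body : String), Dom_split_sections_seq_py body → Spec_split_sections_seq_py body (split_sections_seq_py body)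

-- ===== LEMMAS AND PROOFS =====

-- the section pairs contributed by the headers of `ls` (document order)
def pvPairs : List String → List (String × String)
  | [] => []
  | l :: t =>
      if pvIsH l then (pvNm l, pvCt (t.takeWhile (fun x => !pvIsH x))) :: pvPairs t
      else pvPairs t

def pvHeads (ls : List String) : List Nat :=
  ls.zipIdx.filterMap (fun p => if pvIsH p.1 then some p.2 else none)

def pvF (ls : List String) (p : Nat × Nat) : String × String :=
  (pvNm ((ls.drop p.1).headD ""),
   pvCt ((ls.drop (p.1 + 1)).take (p.2 - (p.1 + 1))))

theorem pvHeads_cons (l : String) (t : List String) :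
    pvHeads (l :: t) =
      if pvIsH l then 0 :: (pvHeads t).map (· + 1) else (pvHeads t).map (· + 1) := by
  simp only [pvHeads, List.zipIdx_cons, List.zipIdx_succ, List.filterMap_cons,
    List.filterMap_map, List.map_filterMap]
  by_cases h : pvIsH l <;>
    simp [h, apply_ite (Option.map (fun n : Nat => n + 1))]

theorem pvTake_headD (ls : List String) :
    ls.take ((pvHeads ls).headD ls.length) = ls.takeWhile (fun x => !pvIsH x) := by
  induction ls with
  | nil => simp [pvHeads]
  | cons l t ih =>
      rw [pvHeads_cons]
      by_cases h : pvIsH l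
      · simp [h]
      · cases hh : pvHeads t with
        | nil =>
            rw [hh] at ih; simp only [List.headD_nil] at ih
            simp [h, ih]
        | cons a hs =>
            rw [hh] at ih; simp only [List.headD_cons] at ih
            simp [h, ih]

theorem pvF_shift (l : String) (t : List String) (a b : Nat) :
    pvF (l :: t) (a + 1, b + 1) = pvF t (a, b) := by
  simp [pvF, List.drop_succ_cons, Nat.succ_sub_succ_eq_sub]

theorem pvZip_cons (X : List Nat) (m : Nat) :
    (0 :: X).zip (X ++ [m]) = (0, (X ++ [m]).headD 0) :: X.zip (X.drop 1 ++ [m]) := by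
  cases X <;> simp

theorem pvShift (l : String) (t : List String) (hs : List Nat) :
    (((hs.map (· + 1)).zip ((hs.map (· + 1)).drop 1 ++ [t.length + 1])).map (pvF (l :: t)))
      = (hs.zip (hs.drop 1 ++ [t.length])).map (pvF t) := by
  have h1 : (hs.map (· + 1)).drop 1 ++ [t.length + 1]
      = (hs.drop 1 ++ [t.length]).map (· + 1) := by
    simp
  rw [h1, List.zip_map, List.map_map]
  refine List.map_congr_left (fun p _ => ?_)
  obtain ⟨a, b⟩ := p
  exact pvF_shift l t a b

theorem pvHeadD_shift (hs : List Nat) (n : Nat) :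
    ((hs.map (· + 1)) ++ [n + 1]).headD 0 - 1 = hs.headD n := by
  cases hs <;> simp

theorem pvSections_eq (ls : List String) :
    ((pvHeads ls).zip ((pvHeads ls).drop 1 ++ [ls.length])).map (pvF ls) = pvPairs ls := by
  induction ls with
  | nil => simp [pvHeads, pvPairs]
  | cons l t ih =>
      rw [pvHeads_cons]
      by_cases h : pvIsH l
      · rw [if_pos h]
        simp only [List.length_cons, List.drop_succ_cons, List.drop_zero, pvZip_cons,
          List.map_cons, pvShift, ih]
        have hhead : pvF (l :: t) (0, ((pvHeads t).map (· + 1) ++ [t.length + 1]).headD 0)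
            = (pvNm l, pvCt (t.takeWhile (fun x => !pvIsH x))) := by
          simp only [pvF, Nat.zero_add, List.drop_zero, List.headD_cons,
            List.drop_succ_cons, pvHeadD_shift, pvTake_headD t]
        rw [hhead, show pvPairs (l :: t)
            = (pvNm l, pvCt (t.takeWhile (fun x => !pvIsH x))) :: pvPairs t by
          simp [pvPairs, h]]
      · rw [if_neg h]
        simp only [List.length_cons, pvShift, ih, pvPairs, h]
        simp

theorem pvA_foldl (ls : List String) (secs : List (String × String)) (cur : String)
    (acc : List String) :
    (ls.foldl pvStepA (secs, cur, acc)).1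
        ++ [((ls.foldl pvStepA (secs, cur, acc)).2.1, pvCt (ls.foldl pvStepA (secs, cur, acc)).2.2)]
      = secs ++ (cur, pvCt (acc ++ ls.takeWhile (fun x => !pvIsH x))) :: pvPairs ls := by
  induction ls generalizing secs cur acc with
  | nil => simp [pvPairs]
  | cons l t ih =>
      by_cases h : pvIsH l
      · rw [List.foldl_cons,
          show pvStepA (secs, cur, acc) l = (secs ++ [(cur, pvCt acc)], pvNm l, []) by
            simp [pvStepA, h],
          ih]
        simp [pvPairs, h]
      · rw [List.foldl_cons,
          show pvStepA (secs, cur, acc) l = (secs, cur, acc ++ [l]) by simp [pvStepA, h],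
          ih]
        simp [pvPairs, h, List.append_assoc]

-- ===== VERDICT (by name: the statement is the Claim_ definition above) =====
theorem split_sections_seq_py_spec : Claim_equal_split_sections_seq_py := by
  intro body _
  show split_sections_seq_py body = split_sections_seq_py_alt body
  have hA := pvA_foldl (pvSplitLines body) [] "__preamble__" []
  simp only [List.nil_append] at hA
  show _ = _
  simp only [split_sections_seq_py, split_sections_seq_py_alt, hA]
  rw [show (pvSplitLines body).zipIdx.filterMap
        (fun p => if pvIsH p.1 then some p.2 else none) = pvHeads (pvSplitLines body) from rfl,
      pvTake_headD]
  congr 1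
  exact (pvSections_eq (pvSplitLines body)).symm
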